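-- pv_equiv track=rewrite | github.com/DOM-C1/Climate-Monitor | email_alerts/email_alert_setup.py | sort_warnings_to_email
-- ===== SOURCE A (Python) =====
-- def emails_to_dict(emails: list[str]) -> dict:
--     """Converts the list of emails to dictionaries with an empty list."""
--
--     email_dict = {}
--     for email in emails:
--         email_dict[email] = []
--
--     return email_dict
--
-- def remove_unnecessary_weather_data(warning: list[str]) -> list[str]:
--     """Remove the unnecessary data from the alerts such as emails.
--     The weather conditions are kept depending on the weather alert type."""
--
--     if warning[0] != 'weather_alert':
--         return warning[:-1]
--
--     alert_type = warning[5]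
--     data = warning[:9]
--     if alert_type == 'Wind':
--         data += warning[11:13] + ['&#x1F32C;']
--     if alert_type in ['Heat', 'Ice']:
--         data += warning[9:11] + ['&#x1F321;']
--     if alert_type == 'Lightning':
--         data += [warning[13]] + ['&#x26A1;']
--     if alert_type == 'Snowfall':
--         data += [warning[14]] + ['&#x1F328;']
--     if alert_type == 'Visibility':
--         data += [warning[15]] + ['&#x1F32B;']
--     if alert_type == 'UV-index':
--         data += [warning[16]] + ['&#x1F506;']
--     if alert_type == 'Rain':
--         data += [warning[17]] + ['&#x1F327;']
--     return data
--
-- def sort_warnings_to_email(emails: list[str], warnings: list[list[str]]) -> dict: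
--     """Creates a dictionary of the emails and all the alerts associated with each."""
--
--     emails = emails_to_dict(emails)
--     for warning in warnings:
--         email = warning[-1]
--         if email not in emails:
--             continue
--
--         emails[email] += [remove_unnecessary_weather_data(warning)]
--
--     return emails
-- ===== SOURCE B (Python) =====
-- _EXTRAS = {
--     'Wind': (11, 13, '&#x1F32C;'),
--     'Heat': (9, 11, '&#x1F321;'),
--     'Ice': (9, 11, '&#x1F321;'),
--     'Lightning': (13, 14, '&#x26A1;'),
--     'Snowfall': (14, 15, '&#x1F328;'),
--     'Visibility': (15, 16, '&#x1F32B;'),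
--     'UV-index': (16, 17, '&#x1F506;'),
--     'Rain': (17, 18, '&#x1F327;'),
-- }
--
-- def _clean(warning):
--     """Strip the warning via a dispatch table instead of a branch chain."""
--     if warning[0] != 'weather_alert':
--         return warning[:-1]
--     extra = _EXTRAS.get(warning[5])
--     if extra is None:
--         return warning[:9]
--     a, b, emoji = extra
--     return warning[:9] + warning[a:b] + [emoji]
--
-- def sort_warnings_to_email(emails, warnings):
--     """Per-email scan: for each listed email, keep the cleaned warnings addressed to it."""
--     return {email: [_clean(w) for w in warnings if w[-1] == email]
--             for email in emails}
-- ===== Notes on version B (the rewrite author's own statement) =====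
-- stated objective: alternative
-- what changed: B replaces A's single hashed distribution pass (seed dict with empty lists, then append each warning to its email's bucket) with a dict comprehension that does one filtered scan of the warnings per listed email, and replaces the helper's if-chain with a dispatch table mapping alert type to (slice bounds, emoji).
import Mathlib
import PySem

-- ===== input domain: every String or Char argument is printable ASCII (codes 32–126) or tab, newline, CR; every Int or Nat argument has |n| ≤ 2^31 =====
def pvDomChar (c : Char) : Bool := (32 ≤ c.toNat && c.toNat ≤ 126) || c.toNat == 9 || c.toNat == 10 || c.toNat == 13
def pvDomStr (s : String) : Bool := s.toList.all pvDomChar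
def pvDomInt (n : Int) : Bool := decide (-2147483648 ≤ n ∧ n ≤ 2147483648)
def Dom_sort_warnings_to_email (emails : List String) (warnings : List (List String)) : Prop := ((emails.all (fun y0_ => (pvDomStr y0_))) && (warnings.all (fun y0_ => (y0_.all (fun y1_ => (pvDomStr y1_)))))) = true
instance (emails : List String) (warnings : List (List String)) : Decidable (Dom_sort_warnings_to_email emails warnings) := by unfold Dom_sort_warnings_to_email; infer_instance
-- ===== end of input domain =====

-- B re-groups the warnings with a per-email dict comprehension (one filtered scan of the
-- warnings for each listed email) and a dispatch table for the per-alert-type extras,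
-- replacing A's single hashed distribution pass and its if-chain; objective: alternative.

-- ===== PORT A =====
-- emails_to_dict: dict with every listed email mapped to []
def pvEmailsToDict (emails : List String) : PySem.Dict String (List (List String)) :=
  emails.foldl (fun d e => d.insert e []) PySem.Dict.empty

-- remove_unnecessary_weather_data; the `none` arms of the matches and the pyGetD defaults
-- are Python IndexError points, excluded by Pre_sort_warnings_to_email
def pvCleanA (w : List String) : List String :=
  match PySem.List.pyGet? w 0 with
  | none => []
  | some h =>
    if h ≠ "weather_alert" then PySem.List.slice w none (some (-1))
    else
      match PySem.List.pyGet? w 5 with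
      | none => []
      | some t =>
        let data := PySem.List.slice w none (some 9)
        let data := if t = "Wind" then data ++ (PySem.List.slice w (some 11) (some 13) ++ ["&#x1F32C;"]) else data
        let data := if t = "Heat" ∨ t = "Ice" then data ++ (PySem.List.slice w (some 9) (some 11) ++ ["&#x1F321;"]) else data
        let data := if t = "Lightning" then data ++ ([PySem.List.pyGetD w 13 ""] ++ ["&#x26A1;"]) else data
        let data := if t = "Snowfall" then data ++ ([PySem.List.pyGetD w 14 ""] ++ ["&#x1F328;"]) else data
        let data := if t = "Visibility" then data ++ ([PySem.List.pyGetD w 15 ""] ++ ["&#x1F32B;"]) else data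
        let data := if t = "UV-index" then data ++ ([PySem.List.pyGetD w 16 ""] ++ ["&#x1F506;"]) else data
        let data := if t = "Rain" then data ++ ([PySem.List.pyGetD w 17 ""] ++ ["&#x1F327;"]) else data
        data

-- loop body of A: warning[-1]; skip if not a listed email; else append the cleaned warning
def pvStepA (d : PySem.Dict String (List (List String))) (w : List String) : PySem.Dict String (List (List String)) :=
  match PySem.List.pyGet? w (-1) with
  | none => d
  | some email =>
    if d.contains email then d.modify email [] (fun v => v ++ [pvCleanA w]) else d

def sort_warnings_to_email (emails : List String) (warnings : List (List String)) : List (String × List (List String)) :=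
  (warnings.foldl pvStepA (pvEmailsToDict emails)).items

-- ===== PORT B =====
def pvExtras : PySem.Dict String (Int × Int × String) :=
  PySem.Dict.ofList
    [("Wind", (11, 13, "&#x1F32C;")), ("Heat", (9, 11, "&#x1F321;")), ("Ice", (9, 11, "&#x1F321;")),
     ("Lightning", (13, 14, "&#x26A1;")), ("Snowfall", (14, 15, "&#x1F328;")),
     ("Visibility", (15, 16, "&#x1F32B;")), ("UV-index", (16, 17, "&#x1F506;")),
     ("Rain", (17, 18, "&#x1F327;"))]

-- _clean of Source B; the `none` arms of the two outer matches are Python IndexError points,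
-- excluded by Pre_sort_warnings_to_email
def pvCleanB (w : List String) : List String :=
  match PySem.List.pyGet? w 0 with
  | none => []
  | some h =>
    if h ≠ "weather_alert" then PySem.List.slice w none (some (-1))
    else
      match PySem.List.pyGet? w 5 with
      | none => []
      | some t =>
        match pvExtras.get? t with
        | none => PySem.List.slice w none (some 9)
        | some (a, b, emoji) =>
          PySem.List.slice w none (some 9) ++ PySem.List.slice w (some a) (some b) ++ [emoji]

def sort_warnings_to_email_alt (emails : List String) (warnings : List (List String)) : List (String × List (List String)) :=
  (emails.foldl
    (fun d email =>
      d.insert email ((warnings.filter (fun w => PySem.List.pyGet? w (-1) == some email)).map pvCleanB))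
    PySem.Dict.empty).items

-- ===== PRECONDITION & SPEC =====
-- the length bounds A needs before it indexes w[5], w[13], …, only demanded of warnings
-- A actually cleans (last field a listed email, head 'weather_alert')
def pvLenOk (w : List String) : Prop :=
  PySem.List.pyGetD w 0 "" = "weather_alert" →
    6 ≤ w.length ∧
    (PySem.List.pyGetD w 5 "" = "Lightning" → 14 ≤ w.length) ∧
    (PySem.List.pyGetD w 5 "" = "Snowfall" → 15 ≤ w.length) ∧
    (PySem.List.pyGetD w 5 "" = "Visibility" → 16 ≤ w.length) ∧
    (PySem.List.pyGetD w 5 "" = "UV-index" → 17 ≤ w.length) ∧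
    (PySem.List.pyGetD w 5 "" = "Rain" → 18 ≤ w.length)

-- exactly the inputs on which Python A returns: every warning nonempty (w[-1]), and a
-- weather_alert warning addressed to a listed email is long enough for the fields its
-- alert type makes remove_unnecessary_weather_data index
def Pre_sort_warnings_to_email (emails : List String) (warnings : List (List String)) : Prop :=
  ∀ w ∈ warnings, w ≠ [] ∧ (PySem.List.pyGetD w (-1) "" ∈ emails → pvLenOk w)

instance (emails : List String) (warnings : List (List String)) : Decidable (Pre_sort_warnings_to_email emails warnings) := by
  unfold Pre_sort_warnings_to_email pvLenOk; infer_instance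

def pvWitness_sort_warnings_to_email : List String × List (List String) :=
  (["a@b.c", "d@e.f"], [["flood", "x", "a@b.c"], ["weather_alert", "1", "2", "3", "4", "Wind", "6", "7", "8", "d@e.f"]])

def Spec_sort_warnings_to_email (emails : List String) (warnings : List (List String)) (out : List (String × List (List String))) : Prop := out = sort_warnings_to_email_alt emails warnings
instance (emails : List String) (warnings : List (List String)) (out : List (String × List (List String))) : Decidable (Spec_sort_warnings_to_email emails warnings out) := by unfold Spec_sort_warnings_to_email; infer_instance

-- ===== CLAIM (what is proved, stated in full; the proofs are below) =====
def Claim_equal_sort_warnings_to_email : Prop := ∀ (emails : List String) (warnings : List (List String)), Dom_sort_warnings_to_email emails warnings → Pre_sort_warnings_to_email emails warnings → Spec_sort_warnings_to_email emails warnings (sort_warnings_to_email emails warnings)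

-- ===== LEMMAS AND PROOFS =====

-- A's loop body never changes the key set
theorem pvStepA_keys (d : PySem.Dict String (List (List String))) (w : List String) :
    (pvStepA d w).keys = d.keys := by
  unfold pvStepA
  cases PySem.List.pyGet? w (-1) with
  | none => rfl
  | some e =>
    cases hc : d.contains e with
    | false => simp [hc]
    | true =>
      simp only [hc, if_pos]
      rw [PySem.Dict.keys_modify, PySem.Dict.keys_insert_of_contains d _ hc]

theorem pvStepA_contains (d : PySem.Dict String (List (List String))) (w : List String) (c : String) :
    (pvStepA d w).contains c = d.contains c := by
  rw [PySem.Dict.contains_eq_decide_mem_keys, PySem.Dict.contains_eq_decide_mem_keys, pvStepA_keys]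

theorem pvFoldA_keys (ws : List (List String)) (d : PySem.Dict String (List (List String))) :
    (ws.foldl pvStepA d).keys = d.keys := by
  induction ws generalizing d with
  | nil => rfl
  | cons w ws ih => rw [List.foldl_cons, ih, pvStepA_keys]

-- A's loop appends, per present key c, exactly the cleaned warnings addressed to c
theorem pvFoldA_getD (ws : List (List String)) (d : PySem.Dict String (List (List String)))
    (c : String) (hc : d.contains c = true) :
    (ws.foldl pvStepA d).getD c [] =
      d.getD c [] ++ (ws.filter (fun w => PySem.List.pyGet? w (-1) == some c)).map pvCleanA := by
  induction ws generalizing d with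
  | nil => simp
  | cons w ws ih =>
    rw [List.foldl_cons, ih (pvStepA d w) (by rw [pvStepA_contains]; exact hc)]
    unfold pvStepA
    cases hget : PySem.List.pyGet? w (-1) with
    | none => simp [hget]
    | some e =>
      by_cases he : e = c
      · subst he
        simp only [hc, if_pos]
        rw [PySem.Dict.getD_modify]
        simp [hget, List.append_assoc]
      · cases hce : d.contains e with
        | false => simp [hce, hget, he]
        | true =>
          simp only [hce, if_pos]
          rw [PySem.Dict.getD_modify]
          simp [Ne.symm he, hget, he]

-- a fold of inserts whose value depends only on the key: last insert wins
theorem pvFoldIns_getD (g : String → List (List String)) (es : List String)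
    (d : PySem.Dict String (List (List String))) (c : String) :
    (es.foldl (fun d e => d.insert e (g e)) d).getD c [] = if c ∈ es then g c else d.getD c [] := by
  induction es generalizing d with
  | nil => simp
  | cons e es ih =>
    rw [List.foldl_cons, ih]
    by_cases h1 : c ∈ es
    · simp [h1]
    · by_cases h2 : c = e
      · subst h2
        simp [h1]
      · simp [h1, h2, PySem.Dict.getD_insert]

-- xs[n:n+1] is [xs[n]] when n is in range
theorem pvSliceOne (xs : List String) (a b : Int) (n : Nat) (ha : a = (n : Int)) (hb : b = (n : Int) + 1)
    (h : n < xs.length) :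
    PySem.List.slice xs (some a) (some b) = [xs[n]] := by
  subst ha hb
  rw [PySem.List.slice_toNat xs (by positivity) (by positivity)]
  have h1 : ((n : Int) + 1).toNat = n + 1 := by omega
  have h2 : ((n : Int)).toNat = n := by omega
  rw [h1, h2, Nat.add_sub_cancel_left, List.drop_eq_getElem_cons h, List.take_succ_cons,
    List.take_zero]

theorem pvGetDIdx (xs : List String) (i : Int) (n : Nat) (hi : i = (n : Int)) (h : n < xs.length) :
    PySem.List.pyGetD xs i "" = xs[n] := by
  subst hi
  rw [PySem.List.pyGetD_eq_getElem xs "" (by positivity) (by exact_mod_cast h)]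
  congr 1

theorem pvGetSome (xs : List String) (n : Nat) (h : n < xs.length) :
    PySem.List.pyGet? xs (n : Int) = some (xs[n]) := by
  simp [PySem.List.pyGet?, PySem.List.pyIdx?]
  rw [if_pos (by exact_mod_cast h)]
  have h2 : ((n : Int)).toNat = n := by omega
  simp [List.getElem?_eq_getElem h]

-- the two cleaners agree on every warning whose length fits its alert type
theorem pvClean_eq (w : List String) (hok : pvLenOk w) : pvCleanA w = pvCleanB w := by
  unfold pvCleanA pvCleanB
  cases h0 : PySem.List.pyGet? w 0 with
  | none => rfl
  | some hd =>
    by_cases hh : hd = "weather_alert"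
    · subst hh
      simp only [ne_eq, not_true_eq_false, if_neg, not_false_eq_true]
      have hD0 : PySem.List.pyGetD w 0 "" = "weather_alert" := by
        simp [PySem.List.pyGetD, h0]
      obtain ⟨h6, hL, hS, hV, hU, hR⟩ := hok hD0
      have h5 : PySem.List.pyGet? w 5 = some (w[5]'(by omega)) := by
        have := pvGetSome w 5 (by omega)
        simpa using this
      rw [h5]
      have hD5 : PySem.List.pyGetD w 5 "" = w[5]'(by omega) := by
        simp [PySem.List.pyGetD, h5]
      have htbl : pvExtras = PySem.Dict.mk
        [("Wind", (11, 13, "&#x1F32C;")), ("Heat", (9, 11, "&#x1F321;")), ("Ice", (9, 11, "&#x1F321;")),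
         ("Lightning", (13, 14, "&#x26A1;")), ("Snowfall", (14, 15, "&#x1F328;")),
         ("Visibility", (15, 16, "&#x1F32B;")), ("UV-index", (16, 17, "&#x1F506;")),
         ("Rain", (17, 18, "&#x1F327;"))] := by rfl
      set t := w[5]'(by omega) with ht
      by_cases c1 : t = "Wind"
      · rw [c1, htbl]; simp [PySem.Dict.get?_mk_cons]
      by_cases c2 : t = "Heat"
      · rw [c2, htbl]; simp [PySem.Dict.get?_mk_cons]
      by_cases c3 : t = "Ice"
      · rw [c3, htbl]; simp [PySem.Dict.get?_mk_cons]
      by_cases c4 : t = "Lightning"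
      · have h14 : 14 ≤ w.length := hL (by rw [hD5]; exact c4)
        rw [c4, htbl]
        simp [PySem.Dict.get?_mk_cons, pvSliceOne w 13 14 13 rfl (by norm_num) (by omega),
          pvGetDIdx w 13 13 rfl (by omega)]
      by_cases c5 : t = "Snowfall"
      · have h15 : 15 ≤ w.length := hS (by rw [hD5]; exact c5)
        rw [c5, htbl]
        simp [PySem.Dict.get?_mk_cons, pvSliceOne w 14 15 14 rfl (by norm_num) (by omega),
          pvGetDIdx w 14 14 rfl (by omega)]
      by_cases c6 : t = "Visibility"
      · have h16 : 16 ≤ w.length := hV (by rw [hD5]; exact c6)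
        rw [c6, htbl]
        simp [PySem.Dict.get?_mk_cons, pvSliceOne w 15 16 15 rfl (by norm_num) (by omega),
          pvGetDIdx w 15 15 rfl (by omega)]
      by_cases c7 : t = "UV-index"
      · have h17 : 17 ≤ w.length := hU (by rw [hD5]; exact c7)
        rw [c7, htbl]
        simp [PySem.Dict.get?_mk_cons, pvSliceOne w 16 17 16 rfl (by norm_num) (by omega),
          pvGetDIdx w 16 16 rfl (by omega)]
      by_cases c8 : t = "Rain"
      · have h18 : 18 ≤ w.length := hR (by rw [hD5]; exact c8)
        rw [c8, htbl]
        simp [PySem.Dict.get?_mk_cons, pvSliceOne w 17 18 17 rfl (by norm_num) (by omega),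
          pvGetDIdx w 17 17 rfl (by omega)]
      · rw [htbl]
        simp [PySem.Dict.get?_mk_cons, Ne.symm c1, Ne.symm c2, Ne.symm c3, Ne.symm c4,
          Ne.symm c5, Ne.symm c6, Ne.symm c7, Ne.symm c8, c1, c2, c3, c4, c5, c6, c7, c8]
        rfl
    · simp [hh]

-- ===== VERDICT (by name: the statement is the Claim_ definition above) =====
theorem sort_warnings_to_email_spec : Claim_equal_sort_warnings_to_email := by
  intro emails warnings _hDom hPre
  unfold Spec_sort_warnings_to_email sort_warnings_to_email sort_warnings_to_email_alt
  have hkA : (warnings.foldl pvStepA (pvEmailsToDict emails)).keys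
      = PySem.Set.update ([] : PySem.Set String) emails := by
    rw [pvFoldA_keys]
    have h := PySem.Dict.keys_foldl_insert emails (fun _ _ => ([] : List (List String)))
      PySem.Dict.empty
    simpa [PySem.Dict.keys_empty, pvEmailsToDict] using h
  have hkB : ((emails.foldl
      (fun d email =>
        d.insert email ((warnings.filter (fun w => PySem.List.pyGet? w (-1) == some email)).map pvCleanB))
      PySem.Dict.empty)).keys = PySem.Set.update ([] : PySem.Set String) emails := by
    have h := PySem.Dict.keys_foldl_insert emails
      (fun _ email => (warnings.filter (fun w => PySem.List.pyGet? w (-1) == some email)).map pvCleanB)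
      PySem.Dict.empty
    simpa [PySem.Dict.keys_empty] using h
  have hnodA : (warnings.foldl pvStepA (pvEmailsToDict emails)).keys.Nodup := by
    rw [hkA]; exact PySem.Set.nodup_update _ _ (by simp)
  have hnodB : ((emails.foldl
      (fun d email =>
        d.insert email ((warnings.filter (fun w => PySem.List.pyGet? w (-1) == some email)).map pvCleanB))
      PySem.Dict.empty)).keys.Nodup := by
    rw [hkB]; exact PySem.Set.nodup_update _ _ (by simp)
  rw [PySem.Dict.items_eq_map_keys _ hnodA ([]), PySem.Dict.items_eq_map_keys _ hnodB ([]), hkA, hkB]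
  apply List.map_congr_left
  intro k hk
  have hkmem : k ∈ emails := by
    have := (PySem.Set.mem_update _ _ _).1 hk
    simpa using this
  have hcA : (pvEmailsToDict emails).contains k = true := by
    rw [PySem.Dict.contains_eq_decide_mem_keys]
    have h := PySem.Dict.keys_foldl_insert emails (fun _ _ => ([] : List (List String)))
      PySem.Dict.empty
    have hk' : (pvEmailsToDict emails).keys = PySem.Set.update ([] : PySem.Set String) emails := by
      simpa [PySem.Dict.keys_empty, pvEmailsToDict] using h
    rw [hk']
    simp only [decide_eq_true_eq]
    exact (PySem.Set.mem_update _ _ _).2 (Or.inr hkmem)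
  have hA0 : (pvEmailsToDict emails).getD k [] = [] := by
    unfold pvEmailsToDict
    rw [pvFoldIns_getD (fun _ => []) emails _ k]
    simp
  have hBv : ((emails.foldl
      (fun d email =>
        d.insert email ((warnings.filter (fun w => PySem.List.pyGet? w (-1) == some email)).map pvCleanB))
      PySem.Dict.empty)).getD k []
      = (warnings.filter (fun w => PySem.List.pyGet? w (-1) == some k)).map pvCleanB := by
    rw [pvFoldIns_getD (fun email => (warnings.filter (fun w => PySem.List.pyGet? w (-1) == some email)).map pvCleanB) emails _ k]
    simp [hkmem]
  rw [pvFoldA_getD warnings _ k hcA, hA0, hBv, List.nil_append]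
  refine congrArg (fun x => (k, x)) ?_
  apply List.map_congr_left
  intro w hw
  obtain ⟨hwmem, hwp⟩ := List.mem_filter.1 hw
  have hlast : PySem.List.pyGet? w (-1) = some k := by
    simpa using hwp
  obtain ⟨_hne, hcond⟩ := hPre w hwmem
  have hlastD : PySem.List.pyGetD w (-1) "" = k := by
    simp [PySem.List.pyGetD, hlast]
  exact pvClean_eq w (hcond (by rw [hlastD]; exact hkmem))
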